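-- pv_equiv track=rewrite | github.com/janisaiad/abstractrl | src/AbstractBeam/crossbeam/experiment/v5/run_mcts_inference_analysis.py | _depths
-- ===== SOURCE A (Python) =====
-- from typing import Any, Dict, List, Optional, Tuple
--
-- def _depths(nodes: List[Dict[str, Any]]) -> List[int]:
--     n = len(nodes)
--     parent = [int(x.get("parent", -1)) for x in nodes]
--     depth = [-1] * n
--     for i in range(n):
--         if depth[i] >= 0:
--             continue
--         cur = i
--         stack: List[int] = []
--         while 0 <= cur < n and depth[cur] < 0:
--             stack.append(cur)
--             p = parent[cur]
--             if p == cur: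
--                 p = -1
--             cur = p
--         base = 0 if cur < 0 or cur >= n else depth[cur] + 1
--         for nid in reversed(stack):
--             depth[nid] = base
--             base += 1
--     for i in range(n):
--         if depth[i] < 0:
--             depth[i] = 0
--     return depth
-- ===== SOURCE B (Python) =====
-- from typing import Any, Dict, List
--
-- def _depths(nodes: List[Dict[str, Any]]) -> List[int]:
--     n = len(nodes)
--     parent = [int(x.get("parent", -1)) for x in nodes]
--
--     def depth_of(i: int) -> int:
--         steps = 0
--         cur = i
--         while True:
--             p = parent[cur]
--             if p == cur:
--                 p = -1
--             if not (0 <= p < n):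
--                 return steps
--             steps += 1
--             cur = p
--
--     return [depth_of(i) for i in range(n)]
-- ===== Notes on version B (the rewrite author's own statement) =====
-- stated objective: simpler
-- what changed: Replaces A's memoized single pass (shared depth array, explicit stack of the walked chain, reversed back-fill with a running base, plus a final fix-up pass) by an independent parent-chain walk per node that simply counts the steps until the chain leaves the range.
import Mathlib
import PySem

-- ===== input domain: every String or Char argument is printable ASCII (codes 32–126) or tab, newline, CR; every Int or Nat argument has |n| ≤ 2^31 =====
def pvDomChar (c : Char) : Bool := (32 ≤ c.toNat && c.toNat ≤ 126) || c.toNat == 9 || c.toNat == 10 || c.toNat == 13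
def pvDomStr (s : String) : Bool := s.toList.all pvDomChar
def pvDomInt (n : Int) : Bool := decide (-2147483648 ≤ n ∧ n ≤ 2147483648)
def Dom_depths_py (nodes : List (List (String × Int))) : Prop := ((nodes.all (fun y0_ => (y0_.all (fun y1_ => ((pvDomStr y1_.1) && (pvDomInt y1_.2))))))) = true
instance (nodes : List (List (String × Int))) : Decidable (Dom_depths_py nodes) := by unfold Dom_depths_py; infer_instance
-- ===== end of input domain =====

-- B replaces A's memoized single pass (depth array + stack back-fill + fix-up pass) by an
-- independent step-counting walk up the parent chain for each node (simpler, not faster).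

-- shared helpers: both Pythons literally contain "p = parent[cur]; if p == cur: p = -1"
-- and the range test "0 <= p < n".
def parentsOf (nodes : List (List (String × Int))) : List Int :=
  nodes.map (fun x => PySem.Dict.getD (PySem.Dict.mk x) "parent" (-1))

def stepZ (par : List Int) (cur : Int) : Int :=
  let p := par.getD cur.toNat 0   -- parent[cur]; only read when 0 ≤ cur < len par
  if p = cur then -1 else p

def inRb (par : List Int) (p : Int) : Bool :=
  decide (0 ≤ p ∧ p < (par.length : Int))

-- ===== PORT A =====
-- the inner `while 0 <= cur < n and depth[cur] < 0` loop; fuel n+1 suffices whenever the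
-- Python loop terminates (the walked chain is then duplicate-free)
def awalk (par d : List Int) : ℕ → Int → List Int → List Int × Int
  | 0, cur, stack => (stack, cur)
  | fuel+1, cur, stack =>
      if inRb par cur = true ∧ d.getD cur.toNat 0 < 0 then
        awalk par d fuel (stepZ par cur) (stack ++ [cur])
      else (stack, cur)

-- `for nid in reversed(stack): depth[nid] = base; base += 1` (called on stack.reverse)
def assign : List Int → Int → List Int → List Int
  | d, _, [] => d
  | d, base, nid :: rest => assign (d.set nid.toNat base) (base + 1) rest

-- one iteration of the outer `for i in range(n)` loop
def aouter (par : List Int) (d : List Int) (i : ℕ) : List Int :=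
  if 0 ≤ d.getD i 0 then d
  else
    let r := awalk par d (par.length + 1) ((i : Int)) []
    let base : Int := if r.2 < 0 ∨ (par.length : Int) ≤ r.2 then 0 else d.getD r.2.toNat 0 + 1
    assign d base r.1.reverse

def depths_py (nodes : List (List (String × Int))) : List Int :=
  let par := parentsOf nodes
  let d := (List.range par.length).foldl (aouter par) (List.replicate par.length (-1))
  d.map (fun v => if v < 0 then 0 else v)

-- ===== PORT B =====
-- `depth_of(i)`: count steps up the parent chain until it leaves range; fuel n suffices
-- whenever the Python loop terminates (the chain nodes are then distinct)
def bwalk (par : List Int) : ℕ → Int → Int → Int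
  | 0, steps, _ => steps
  | fuel+1, steps, cur =>
      let p := stepZ par cur
      if inRb par p = true then bwalk par fuel (steps + 1) p else steps

def depths_py_alt (nodes : List (List (String × Int))) : List Int :=
  let par := parentsOf nodes
  (List.range par.length).map (fun i : ℕ => bwalk par par.length 0 (i : Int))

-- ===== PRECONDITION & SPEC =====
-- step function made total by absorbing everything outside [0, n) into the root marker -1
def stepA (par : List Int) (cur : Int) : Int :=
  if inRb par cur = true then stepZ par cur else -1

-- Pre_ excludes exactly the parent graphs containing a cycle (of length ≥ 2, after the
-- self-loop normalisation): there BOTH Pythons loop forever and return nothing.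
-- Acyclic ⟺ every parent chain leaves the index range within n steps.
def Pre_depths_py (nodes : List (List (String × Int))) : Prop :=
  ∀ i : ℕ, i < nodes.length →
    inRb (parentsOf nodes) ((stepA (parentsOf nodes))^[nodes.length] ((i : Int))) = false

instance (nodes : List (List (String × Int))) : Decidable (Pre_depths_py nodes) := by
  unfold Pre_depths_py; infer_instance

def pvWitness_depths_py : (List (List (String × Int))) :=
  [[("parent", -1)], [("parent", 0)], [], [("parent", 1)]]

def Spec_depths_py (nodes : List (List (String × Int))) (out : List Int) : Prop := out = depths_py_alt nodes
instance (nodes : List (List (String × Int))) (out : List Int) : Decidable (Spec_depths_py nodes out) := by unfold Spec_depths_py; infer_instance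

-- ===== CLAIM (what is proved, stated in full; the proofs are below) =====
def Claim_equal_depths_py : Prop := ∀ (nodes : List (List (String × Int))), Dom_depths_py nodes → Pre_depths_py nodes → Spec_depths_py nodes (depths_py nodes)

-- ===== LEMMAS AND PROOFS =====

-- the depth value B computes for a node (B's walk with its fuel)
def Dp (par : List Int) (cur : Int) : Int := bwalk par par.length 0 cur

-- acyclicity restated for arbitrary in-range starting points
def EscAll (par : List Int) : Prop :=
  ∀ c : Int, inRb par c = true → inRb par ((stepA par)^[par.length] c) = false

lemma inRb_iff (par : List Int) (c : Int) :
    inRb par c = true ↔ 0 ≤ c ∧ c < (par.length : Int) := by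
  simp [inRb]

lemma bwalk_acc (par : List Int) :
    ∀ (fuel : ℕ) (s cur : Int), bwalk par fuel s cur = s + bwalk par fuel 0 cur := by
  intro fuel
  induction fuel with
  | zero => intro s cur; simp [bwalk]
  | succ f ih =>
      intro s cur
      simp only [bwalk]
      split
      · rw [ih (s + 1), ih (0 + 1)]; ring
      · simp

lemma bwalk_ge (par : List Int) :
    ∀ (fuel : ℕ) (s cur : Int), s ≤ bwalk par fuel s cur := by
  intro fuel
  induction fuel with
  | zero => intro s cur; simp [bwalk]
  | succ f ih =>
      intro s cur
      simp only [bwalk]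
      split
      · exact le_trans (by omega) (ih (s + 1) _)
      · exact le_rfl

lemma bwalk_le (par : List Int) :
    ∀ (fuel : ℕ) (s cur : Int), bwalk par fuel s cur ≤ s + fuel := by
  intro fuel
  induction fuel with
  | zero => intro s cur; simp [bwalk]
  | succ f ih =>
      intro s cur
      simp only [bwalk]
      split
      · exact le_trans (ih (s + 1) _) (by push_cast; omega)
      · push_cast; omega

lemma Dp_nonneg (par : List Int) (cur : Int) : 0 ≤ Dp par cur := bwalk_ge par _ 0 cur

lemma Dp_le (par : List Int) (cur : Int) : Dp par cur ≤ (par.length : ℤ) := by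
  have := bwalk_le par par.length 0 cur
  simpa [Dp] using this

lemma escape_step (par : List Int) (k : ℕ) (cur : Int) (hc : inRb par cur = true)
    (h : inRb par ((stepA par)^[k + 1] cur) = false) :
    inRb par ((stepA par)^[k] (stepZ par cur)) = false := by
  rw [Function.iterate_succ_apply] at h
  rwa [show stepA par cur = stepZ par cur by simp [stepA, hc]] at h

lemma bwalk_stable (par : List Int) :
    ∀ (k : ℕ) (cur : Int) (fuel : ℕ), inRb par cur = true →
      inRb par ((stepA par)^[k] cur) = false → k ≤ fuel →
      bwalk par fuel 0 cur = bwalk par k 0 cur := by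
  intro k
  induction k with
  | zero =>
      intro cur fuel hc h _
      simp only [Function.iterate_zero, id] at h
      rw [h] at hc; cases hc
  | succ k ih =>
      intro cur fuel hc h hle
      obtain ⟨f, rfl⟩ : ∃ f, fuel = f + 1 := ⟨fuel - 1, by omega⟩
      have hstep := escape_step par (k := k) (cur := cur) hc h
      by_cases hp : inRb par (stepZ par cur) = true
      · show bwalk par (f + 1) 0 cur = bwalk par (k + 1) 0 cur
        simp only [bwalk, hp, if_pos]
        rw [bwalk_acc par f, bwalk_acc par k, ih (stepZ par cur) f hp hstep (by omega)]
      · simp only [bwalk, hp]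
        simp

lemma Dp_base (par : List Int) (cur : Int) (hc : inRb par cur = true)
    (hp : inRb par (stepZ par cur) = false) : Dp par cur = 0 := by
  have hn : 1 ≤ par.length := by
    rcases (inRb_iff par cur).1 hc with ⟨h1, h2⟩; omega
  obtain ⟨f, hf⟩ : ∃ f, par.length = f + 1 := ⟨par.length - 1, by omega⟩
  rw [Dp, hf]
  simp only [bwalk, hp]
  simp

lemma Dp_rec (par : List Int) (cur : Int) (hpre : EscAll par) (hc : inRb par cur = true)
    (hp : inRb par (stepZ par cur) = true) :
    Dp par cur = Dp par (stepZ par cur) + 1 := by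
  have hn : 1 ≤ par.length := by
    rcases (inRb_iff par cur).1 hc with ⟨h1, h2⟩; omega
  obtain ⟨f, hf⟩ : ∃ f, par.length = f + 1 := ⟨par.length - 1, by omega⟩
  have hesc := hpre cur hc
  rw [hf] at hesc
  have hstep := escape_step par (k := f) (cur := cur) hc hesc
  have h1 : Dp par cur = 1 + bwalk par f 0 (stepZ par cur) := by
    rw [Dp, hf]
    simp only [bwalk, hp, if_pos]
    rw [bwalk_acc par f]
    ring
  have h2 : Dp par (stepZ par cur) = bwalk par f 0 (stepZ par cur) := by
    rw [Dp, hf]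
    exact bwalk_stable par f (stepZ par cur) (f + 1) hp hstep (by omega)
  omega

lemma getD_replicate_neg (n j : ℕ) (hj : j < n) :
    (List.replicate n (-1 : ℤ)).getD j 0 = -1 := by
  rw [List.getD_eq_getElem _ _ (by simpa using hj)]
  simp

lemma getD_set_self (d : List Int) (k : ℕ) (v : Int) (hk : k < d.length) :
    (d.set k v).getD k 0 = v := by
  rw [List.getD_eq_getElem _ _ (by simpa using hk)]
  simp

lemma getD_set_ne (d : List Int) (k j : ℕ) (v : Int) (h : k ≠ j) :
    (d.set k v).getD j 0 = d.getD j 0 := by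
  simp [List.getD_eq_getElem?_getD, List.getElem?_set_ne h]

lemma assign_length : ∀ (l d : List Int) (base : Int),
    (assign d base l).length = d.length := by
  intro l
  induction l with
  | nil => intro d base; simp [assign]
  | cons x r ih => intro d base; simp [assign, ih]

lemma assign_unchanged : ∀ (l d : List Int) (base : Int) (k : ℕ),
    (∀ x ∈ l, x.toNat ≠ k) → (assign d base l).getD k 0 = d.getD k 0 := by
  intro l
  induction l with
  | nil => intro d base k _; simp [assign]
  | cons x r ih =>
      intro d base k h
      simp only [assign]
      rw [ih _ _ _ (fun y hy => h y (List.mem_cons_of_mem _ hy))]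
      exact getD_set_ne d x.toNat k base (h x (by simp))

lemma assign_written : ∀ (l d : List Int) (base : Int) (t : ℕ) (ht : t < l.length),
    l.Nodup → (∀ x ∈ l, 0 ≤ x ∧ x.toNat < d.length) →
    (assign d base l).getD (l[t].toNat) 0 = base + t := by
  intro l
  induction l with
  | nil => intro d base t ht; simp at ht
  | cons x r ih =>
      intro d base t ht hnd hmem
      match t with
      | 0 =>
          simp only [List.getElem_cons_zero, assign]
          rw [assign_unchanged]
          · push_cast
            rw [getD_set_self d x.toNat base (hmem x (by simp)).2]
            ring
          · intro y hy hyx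
            have hx0 : 0 ≤ x := (hmem x (by simp)).1
            have hy0 : 0 ≤ y := (hmem y (by simp [hy])).1
            have : y = x := by omega
            subst this
            exact (List.nodup_cons.1 hnd).1 hy
      | t + 1 =>
          simp only [List.getElem_cons_succ, assign]
          rw [ih (d.set x.toNat base) (base + 1) t (by simpa using ht)
              (List.nodup_cons.1 hnd).2
              (fun y hy => by
                have := hmem y (by simp [hy])
                simpa using this)]
          push_cast
          ring

lemma awalk_spec (par d : List Int) (hpre : EscAll par)
    (hinv : ∀ j : ℕ, j < par.length → d.getD j 0 = -1 ∨ d.getD j 0 = Dp par ((j : Int))) :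
    ∀ (fuel : ℕ) (cur : Int) (stack : List Int),
    (inRb par cur = true → d.getD cur.toNat 0 < 0 → (Dp par cur).toNat < fuel) →
    ∃ (ch : List Int) (e : Int),
      awalk par d fuel cur stack = (stack ++ ch, e) ∧
      (∀ x ∈ ch, inRb par x = true ∧ d.getD x.toNat 0 = -1) ∧
      (inRb par e = false ∨ 0 ≤ d.getD e.toNat 0) ∧
      (∀ t : ℕ, ∀ ht : t < ch.length, Dp par ch[t] =
          (if inRb par e = true then d.getD e.toNat 0 + 1 else 0) + ((ch.length : ℤ) - 1 - (t : ℤ))) ∧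
      ((ch = [] ∧ ¬(inRb par cur = true ∧ d.getD cur.toNat 0 < 0) ∧ e = cur) ∨
       (∃ ch', ch = cur :: ch')) := by
  have hneg1 : ∀ c : Int, inRb par c = true → d.getD c.toNat 0 < 0 → d.getD c.toNat 0 = -1 := by
    intro c hc hlt
    rcases (inRb_iff par c).1 hc with ⟨h0, h1⟩
    have hj : c.toNat < par.length := by omega
    rcases hinv c.toNat hj with h | h
    · exact h
    · exfalso
      have hnn := Dp_nonneg par ((c.toNat : Int))
      have hco : ((c.toNat : Int)) = c := by omega
      rw [hco] at hnn
      rw [hco] at h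
      omega
  intro fuel
  induction fuel with
  | zero =>
      intro cur stack hfuel
      have hC : ¬(inRb par cur = true ∧ d.getD cur.toNat 0 < 0) := by
        rintro ⟨hc, hd⟩
        exact absurd (hfuel hc hd) (by omega)
      refine ⟨[], cur, by simp [awalk], by simp, ?_, by simp, Or.inl ⟨rfl, hC, rfl⟩⟩
      by_cases hc : inRb par cur = true
      · right; by_contra h; exact hC ⟨hc, by omega⟩
      · left; simpa using hc
  | succ f ih =>
      intro cur stack hfuel
      by_cases hC : inRb par cur = true ∧ d.getD cur.toNat 0 < 0
      · obtain ⟨hc, hd⟩ := hC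
        have hdm1 : d.getD cur.toNat 0 = -1 := hneg1 cur hc hd
        have hf' : inRb par (stepZ par cur) = true → d.getD (stepZ par cur).toNat 0 < 0 →
            (Dp par (stepZ par cur)).toNat < f := by
          intro hp _
          have hrec := Dp_rec par cur hpre hc hp
          have h1 := hfuel hc hd
          have h2 := Dp_nonneg par (stepZ par cur)
          omega
        obtain ⟨ch', e, heq, hmem, hexit, hval, hshape⟩ := ih (stepZ par cur) (stack ++ [cur]) hf'
        refine ⟨cur :: ch', e, ?_, ?_, hexit, ?_, Or.inr ⟨ch', rfl⟩⟩
        · show awalk par d (f + 1) cur stack = (stack ++ (cur :: ch'), e)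
          simp only [awalk]
          rw [if_pos ⟨hc, hd⟩, heq]
          simp
        · intro x hx
          rcases List.mem_cons.1 hx with rfl | hx
          · exact ⟨hc, hdm1⟩
          · exact hmem x hx
        · intro t ht
          match t with
          | 0 =>
              simp only [List.getElem_cons_zero, List.length_cons]
              rcases hshape with ⟨rfl, hterm, rfl⟩ | ⟨ch'', rfl⟩
              · by_cases hp : inRb par (stepZ par cur) = true
                · have h0 : 0 ≤ d.getD (stepZ par cur).toNat 0 := by
                    by_contra h
                    exact hterm ⟨hp, by omega⟩
                  have hde : d.getD (stepZ par cur).toNat 0 = Dp par (stepZ par cur) := by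
                    rcases (inRb_iff par _).1 hp with ⟨hp0, hp1⟩
                    have hj : (stepZ par cur).toNat < par.length := by omega
                    rcases hinv (stepZ par cur).toNat hj with h | h
                    · omega
                    · rw [h, show ((stepZ par cur).toNat : Int) = stepZ par cur from by
                        simpa using Int.toNat_of_nonneg hp0]
                  rw [if_pos hp, Dp_rec par cur hpre hc hp, hde]
                  simp
                · rw [if_neg (by simpa using hp), Dp_base par cur hc (by simpa using hp)]
                  simp
              · have hp : inRb par (stepZ par cur) = true := (hmem _ (by simp)).1
                have h0 := hval 0 (by simp)
                simp only [List.getElem_cons_zero] at h0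
                rw [Dp_rec par cur hpre hc hp, h0]
                simp only [List.length_cons]
                push_cast
                ring
          | t + 1 =>
              simp only [List.getElem_cons_succ, List.length_cons]
              have hv := hval t (by simpa using ht)
              rw [hv]
              push_cast
              ring
      · refine ⟨[], cur, ?_, by simp, ?_, by simp, Or.inl ⟨rfl, hC, rfl⟩⟩
        · show awalk par d (f + 1) cur stack = (stack ++ [], cur)
          simp only [awalk]
          rw [if_neg hC]
          simp
        · by_cases hc : inRb par cur = true
          · right; by_contra h; exact hC ⟨hc, by omega⟩
          · left; simpa using hc

lemma nodup_of_inj_vals (par : List Int) (ch : List Int) (B : Int)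
    (hval : ∀ t : ℕ, ∀ ht : t < ch.length,
        Dp par ch[t] = B + ((ch.length : ℤ) - 1 - (t : ℤ))) :
    ch.Nodup := by
  rw [List.nodup_iff_injective_get]
  intro a b hab
  have ha := hval a.1 a.2
  have hb := hval b.1 b.2
  rw [show ch[a.1] = ch.get a from rfl] at ha
  rw [show ch[b.1] = ch.get b from rfl] at hb
  rw [hab] at ha
  apply Fin.ext
  omega

lemma aouter_spec (par : List Int) (hpre : EscAll par) (d : List Int) (i : ℕ)
    (hi : i < par.length) (hlen : d.length = par.length)
    (hinv : ∀ j : ℕ, j < par.length → d.getD j 0 = -1 ∨ d.getD j 0 = Dp par ((j : Int))) :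
    (aouter par d i).length = par.length ∧
    (∀ j : ℕ, j < par.length → (aouter par d i).getD j 0 = d.getD j 0 ∨
        (aouter par d i).getD j 0 = Dp par ((j : Int))) ∧
    (aouter par d i).getD i 0 = Dp par ((i : Int)) := by
  by_cases h0 : 0 ≤ d.getD i 0
  · have hres : aouter par d i = d := by unfold aouter; rw [if_pos h0]
    rw [hres]
    refine ⟨hlen, fun j _ => Or.inl rfl, ?_⟩
    rcases hinv i hi with h | h
    · omega
    · exact h
  · have hc : inRb par ((i : Int)) = true := by
      rw [inRb_iff]; omega
    have hdneg : d.getD ((i : Int)).toNat 0 < 0 := by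
      rw [show ((i : Int)).toNat = i from by simp]; omega
    obtain ⟨ch, e, heq, hmem, hexit, hval, hshape⟩ :=
      awalk_spec par d hpre hinv (par.length + 1) ((i : Int)) []
        (fun _ _ => by
          have h1 := Dp_le par ((i : Int))
          have h2 := Dp_nonneg par ((i : Int))
          omega)
    rcases hshape with ⟨_, habs, _⟩ | ⟨ch', hch⟩
    · exact absurd ⟨hc, hdneg⟩ habs
    have heq' : awalk par d (par.length + 1) ((i : Int)) [] = (ch, e) := by
      simpa using heq
    have hres : aouter par d i =
        assign d (if inRb par e = true then d.getD e.toNat 0 + 1 else 0) ch.reverse := by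
      unfold aouter
      rw [if_neg h0]
      simp only [heq']
      congr 1
      by_cases hE : inRb par e = true
      · rcases (inRb_iff par e).1 hE with ⟨he0, he1⟩
        rw [if_neg (by omega), if_pos hE]
      · have h' : ¬(0 ≤ e ∧ e < (par.length : ℤ)) := fun h => hE ((inRb_iff par e).2 h)
        rw [if_pos (by omega), if_neg hE]
    have hnodup : ch.Nodup := nodup_of_inj_vals par ch _ hval
    have hrevnodup : ch.reverse.Nodup := List.nodup_reverse.2 hnodup
    have hchmem : ∀ x ∈ ch, 0 ≤ x ∧ x.toNat < d.length := by
      intro x hx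
      rcases (inRb_iff par x).1 (hmem x hx).1 with ⟨hx0, hx1⟩
      exact ⟨hx0, by omega⟩
    have hkey : ∀ j : ℕ, j < par.length →
        ((j : Int) ∈ ch → (aouter par d i).getD j 0 = Dp par ((j : Int))) ∧
        ((j : Int) ∉ ch → (aouter par d i).getD j 0 = d.getD j 0) := by
      intro j hj
      constructor
      · intro hmemj
        obtain ⟨t, ht, hct⟩ := List.getElem_of_mem hmemj
        have htlen : ch.length - 1 - t < ch.reverse.length := by
          rw [List.length_reverse]; omega
        have hw := assign_written ch.reverse d
            (if inRb par e = true then d.getD e.toNat 0 + 1 else 0)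
            (ch.length - 1 - t) htlen hrevnodup
            (fun x hx => hchmem x (List.mem_reverse.1 hx))
        rw [List.getElem_reverse] at hw
        have hidx : ch.length - 1 - (ch.length - 1 - t) = t := by omega
        simp only [hidx] at hw
        have hjt : (ch[t]'ht).toNat = j := by rw [hct]; simp
        rw [hjt] at hw
        rw [hres, hw]
        have hv := hval t ht
        rw [hct] at hv
        omega
      · intro hnot
        rw [hres]
        apply assign_unchanged
        intro x hx hxj
        have hxch := List.mem_reverse.1 hx
        have hx0 : 0 ≤ x := (hchmem x hxch).1
        have hxe : x = (j : Int) := by omega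
        exact hnot (hxe ▸ hxch)
    refine ⟨by rw [hres, assign_length]; exact hlen, ?_, ?_⟩
    · intro j hj
      by_cases hmemj : (j : Int) ∈ ch
      · exact Or.inr ((hkey j hj).1 hmemj)
      · exact Or.inl ((hkey j hj).2 hmemj)
    · exact (hkey i hi).1 (by rw [hch]; exact List.mem_cons_self ..)

lemma fold_spec (par : List Int) (hpre : EscAll par) :
    ∀ k : ℕ, k ≤ par.length →
      ((List.range k).foldl (aouter par) (List.replicate par.length (-1))).length = par.length ∧
      (∀ j : ℕ, j < par.length →
        ((List.range k).foldl (aouter par) (List.replicate par.length (-1))).getD j 0 = -1 ∨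
        ((List.range k).foldl (aouter par) (List.replicate par.length (-1))).getD j 0 =
          Dp par ((j : Int))) ∧
      (∀ j : ℕ, j < k →
        ((List.range k).foldl (aouter par) (List.replicate par.length (-1))).getD j 0 =
          Dp par ((j : Int))) := by
  intro k
  induction k with
  | zero =>
      intro _
      refine ⟨by simp, ?_, by omega⟩
      intro j hj
      exact Or.inl (getD_replicate_neg _ j hj)
  | succ k ih =>
      intro hk
      obtain ⟨hlen, hinv, hdone⟩ := ih (by omega)
      rw [List.range_succ, List.foldl_append]
      simp only [List.foldl_cons, List.foldl_nil]
      obtain ⟨l1, l2, l3⟩ := aouter_spec par hpre _ k (by omega) hlen hinv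
      refine ⟨l1, ?_, ?_⟩
      · intro j hj
        rcases l2 j hj with h | h
        · rw [h]; exact hinv j hj
        · exact Or.inr h
      · intro j hj
        rcases Nat.lt_succ_iff_lt_or_eq.1 hj with hj' | rfl
        · rcases l2 j (by omega) with h | h
          · rw [h]; exact hdone j hj'
          · exact h
        · exact l3

lemma main_eq (nodes : List (List (String × Int))) (hpre : Pre_depths_py nodes) :
    depths_py nodes = depths_py_alt nodes := by
  have hpl : (parentsOf nodes).length = nodes.length := by simp [parentsOf]
  have hpre' : EscAll (parentsOf nodes) := by
    intro c hc
    rcases (inRb_iff _ c).1 hc with ⟨h0, h1⟩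
    have h := hpre c.toNat (by omega)
    rw [show (c.toNat : Int) = c from by simpa using Int.toNat_of_nonneg h0] at h
    rw [hpl]
    exact h
  obtain ⟨hlen, _, hall⟩ := fold_spec (parentsOf nodes) hpre' (parentsOf nodes).length le_rfl
  simp only [depths_py, depths_py_alt]
  apply List.ext_getElem
  · simp [hlen]
  · intro j h1 h2
    have hj : j < (parentsOf nodes).length := by
      simpa [hlen] using h1
    have hdj := hall j hj
    rw [List.getD_eq_getElem _ _ (by rw [hlen]; exact hj)] at hdj
    simp only [List.getElem_map, List.getElem_range]
    rw [hdj]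
    have hnn := Dp_nonneg (parentsOf nodes) ((j : Int))
    rw [if_neg (by omega)]
    rfl

-- ===== VERDICT (by name: the statement is the Claim_ definition above) =====
theorem depths_py_spec : Claim_equal_depths_py := by
  intro nodes _ hpre
  unfold Spec_depths_py
  exact main_eq nodes hpre
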